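-- pv_equiv track=rewrite | github.com/askeluv/dai-transitions | utils.py | seconds_spent_in_each_state
-- ===== SOURCE A (Python) =====
-- LAST_TIMESTAMP = 1549495867 # last timestamp observed (i.e. end of the observation period)
--
-- def simplify_state(s):
--     "Collapse 'born' and 'safe again' states into one state: 'safe'."
--     if s in ('born', 'safe again'):
--         return 'safe'
--     else:
--         return s
--
-- def seconds_spent_in_each_state(seq):
--     "Calculate seconds spent in each state for a given sequence."
--     result = []
--     for (i, (s, ts)) in enumerate(seq):
--         if i + 1 == len(seq):
--             time_spent = LAST_TIMESTAMP - ts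
--         else:
--             next_ts = seq[i + 1][1]
--             time_spent = next_ts - ts
--         s = simplify_state(s)
--         result.append((s, ts, time_spent))
--     return result
-- ===== SOURCE B (Python) =====
-- LAST_TIMESTAMP = 1549495867
--
--
-- def simplify_state(s):
--     "Collapse 'born' and 'safe again' states into one state: 'safe'."
--     if s in ('born', 'safe again'):
--         return 'safe'
--     else:
--         return s
--
--
-- def seconds_spent_in_each_state(seq):
--     "Calculate seconds spent in each state for a given sequence."
--     # Single backward pass: walk the sequence from the end, carrying the
--     # timestamp of the following entry as an accumulator (seeded with the
--     # sentinel), so no indexing or lookahead is ever needed; then reverse.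
--     result = []
--     next_ts = LAST_TIMESTAMP
--     for s, ts in reversed(seq):
--         result.append((simplify_state(s), ts, next_ts - ts))
--         next_ts = ts
--     result.reverse()
--     return result
-- ===== Notes on version B (the rewrite author's own statement) =====
-- stated objective: alternative
-- what changed: Replaces A's forward indexed loop with a last-element length test and seq[i+1] lookahead by a backward pass over reversed(seq) that carries the next timestamp as an accumulator (seeded with the sentinel) and reverses the result at the end.
import Mathlib
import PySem

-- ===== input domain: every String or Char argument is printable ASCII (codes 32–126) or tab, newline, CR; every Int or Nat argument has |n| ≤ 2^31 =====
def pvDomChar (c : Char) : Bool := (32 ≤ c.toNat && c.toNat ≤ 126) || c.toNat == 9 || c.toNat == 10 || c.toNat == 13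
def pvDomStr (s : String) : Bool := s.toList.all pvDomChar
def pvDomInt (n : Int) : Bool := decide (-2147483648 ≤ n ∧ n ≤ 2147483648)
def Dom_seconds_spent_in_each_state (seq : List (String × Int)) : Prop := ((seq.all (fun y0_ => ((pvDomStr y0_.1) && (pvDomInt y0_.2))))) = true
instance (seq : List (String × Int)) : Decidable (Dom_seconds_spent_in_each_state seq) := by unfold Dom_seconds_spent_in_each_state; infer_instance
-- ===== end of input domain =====

-- B replaces A's forward indexed loop (last-element length test, seq[i+1] lookahead) by a
-- backward pass carrying the next timestamp as an accumulator, then reversing; objective: alternative.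

def LAST_TIMESTAMP : Int := 1549495867

def simplify_state (s : String) : String :=
  if s = "born" ∨ s = "safe again" then "safe" else s

-- ===== PORT A =====
def seconds_spent_in_each_state (seq : List (String × Int)) : List (String × Int × Int) :=
  (PySem.List.enumerate seq 0).foldl
    (fun result p =>
      let i := p.1
      let s := p.2.1
      let ts := p.2.2
      let time_spent : Int :=
        if i + 1 = (seq.length : Int) then LAST_TIMESTAMP - ts
        else
          -- seq[i+1][1]; in this branch the index is in range, so the 'none'
          -- (IndexError) default 0 is unreachable
          (((PySem.List.pyGet? seq (i + 1)).map Prod.snd).getD 0) - ts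
      result ++ [(simplify_state s, ts, time_spent)])
    []

-- ===== PORT B =====
def seconds_spent_in_each_state_alt (seq : List (String × Int)) : List (String × Int × Int) :=
  (seq.reverse.foldl
    (fun (acc : List (String × Int × Int) × Int) e =>
      (acc.1 ++ [(simplify_state e.1, e.2, acc.2 - e.2)], e.2))
    ([], LAST_TIMESTAMP)).1.reverse

-- ===== PRECONDITION & SPEC =====
def Spec_seconds_spent_in_each_state (seq : List (String × Int)) (out : List (String × Int × Int)) : Prop := out = seconds_spent_in_each_state_alt seq
instance (seq : List (String × Int)) (out : List (String × Int × Int)) : Decidable (Spec_seconds_spent_in_each_state seq out) := by unfold Spec_seconds_spent_in_each_state; infer_instance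

-- ===== CLAIM (what is proved, stated in full; the proofs are below) =====
def Claim_equal_seconds_spent_in_each_state : Prop := ∀ (seq : List (String × Int)), Dom_seconds_spent_in_each_state seq → Spec_seconds_spent_in_each_state seq (seconds_spent_in_each_state seq)

-- ===== LEMMAS AND PROOFS =====

-- foldl with snoc is a map
theorem foldl_snoc_map {α β : Type} (g : α → β) (l : List α) (acc : List β) :
    l.foldl (fun r x => r ++ [g x]) acc = acc ++ l.map g := by
  induction l generalizing acc with
  | nil => simp
  | cons x xs ih => simp [List.foldl, ih]

-- B's backward fold, characterised: it zips the traversed list with the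
-- cons of the seed timestamp and the list's own timestamps.
theorem foldB_fst (l : List (String × Int)) (acc : List (String × Int × Int)) (T : Int) :
    (l.foldl
      (fun (acc : List (String × Int × Int) × Int) e =>
        (acc.1 ++ [(simplify_state e.1, e.2, acc.2 - e.2)], e.2))
      (acc, T)).1
    = acc ++ (l.zip (T :: l.map Prod.snd)).map
        (fun p => (simplify_state p.1.1, p.1.2, p.2 - p.1.2)) := by
  induction l generalizing acc T with
  | nil => simp
  | cons e l' ih => simp [List.foldl, ih]

-- B's reversed zip is the reverse of the forward lookahead zip.
theorem zip_rev (l : List (String × Int)) (T : Int) :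
    l.reverse.zip (T :: l.reverse.map Prod.snd)
    = (l.zip (l.tail.map Prod.snd ++ [T])).reverse := by
  induction l using List.reverseRecOn generalizing T with
  | nil => simp
  | append_singleton l0 b ih =>
    have hstep : (l0 ++ [b]).zip ((l0 ++ [b]).tail.map Prod.snd ++ [T])
        = l0.zip (l0.tail.map Prod.snd ++ [b.2]) ++ [(b, T)] := by
      cases l0 with
      | nil => simp
      | cons c r =>
        have h1 : (c :: r ++ [b]).tail.map Prod.snd ++ [T]
            = (r.map Prod.snd ++ [b.2]) ++ [T] := by simp
        rw [show c :: r ++ [b] = (c :: r) ++ [b] by simp, h1,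
            List.zip_append (by simp)]
        simp
    have hL : (l0 ++ [b]).reverse = b :: l0.reverse := by simp
    rw [hstep, hL]
    simp only [List.map_cons, List.zip_cons_cons, List.reverse_append,
      List.reverse_cons, List.reverse_nil, List.nil_append]
    rw [ih b.2]
    simp

-- A equals the forward lookahead zip (proved element-wise).
theorem A_eq_zip (seq : List (String × Int)) :
    seconds_spent_in_each_state seq
    = (seq.zip (seq.tail.map Prod.snd ++ [LAST_TIMESTAMP])).map
        (fun p => (simplify_state p.1.1, p.1.2, p.2 - p.1.2)) := by
  unfold seconds_spent_in_each_state
  rw [foldl_snoc_map]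
  simp only [List.nil_append]
  apply List.ext_getElem
  · simp [PySem.List.length_enumerate, List.length_zip, List.length_tail]
    omega
  · intro k h1 h2
    have hk : k < seq.length := by
      simpa [PySem.List.length_enumerate] using h1
    rw [List.getElem_map, List.getElem_map, PySem.List.getElem_enumerate,
        List.getElem_zip]
    simp only [Int.zero_add]
    have hnext : (seq.tail.map Prod.snd ++ [LAST_TIMESTAMP])[k]'(by
        simp [List.length_zip, List.length_tail] at h2 ⊢; omega) =
        if h : k + 1 < seq.length then (seq[k + 1]).2 else LAST_TIMESTAMP := by
      by_cases hlt : k + 1 < seq.length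
      · rw [List.getElem_append_left (by simp [List.length_tail]; omega),
            List.getElem_map, List.getElem_tail]
        simp [hlt]
      · have hk1 : k = seq.length - 1 := by omega
        have hlen : (seq.tail.map Prod.snd).length = k := by
          simp [List.length_tail]; omega
        rw [List.getElem_append_right (by omega)]
        simp [hlt]
    rw [hnext]
    by_cases hlt : k + 1 < seq.length
    · have hne : (k : Int) + 1 ≠ (seq.length : Int) := by omega
      have : PySem.List.pyGet? seq ((k : Int) + 1) = seq[k + 1]? := by
        have := PySem.List.pyGet?_natCast seq (k + 1)
        simpa [Int.natCast_add] using this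
      simp [hne, this, hlt]
    · have heq : (k : Int) + 1 = (seq.length : Int) := by omega
      simp [heq, hlt]

theorem seconds_eq (seq : List (String × Int)) :
    seconds_spent_in_each_state seq = seconds_spent_in_each_state_alt seq := by
  unfold seconds_spent_in_each_state_alt
  rw [foldB_fst, List.nil_append, zip_rev, ← List.map_reverse, List.reverse_reverse]
  exact A_eq_zip seq

-- ===== VERDICT (by name: the statement is the Claim_ definition above) =====
theorem seconds_spent_in_each_state_spec : Claim_equal_seconds_spent_in_each_state := by
  intro seq _
  unfold Spec_seconds_spent_in_each_state
  exact seconds_eq seq
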